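-- pv_equiv track=rewrite | github.com/sandeep-krishna/100DaysOfCode | Day 08/MagicalWord.py | convert
-- ===== SOURCE A (Python) =====
-- primes = [67,71,73,79,83,89,97,101,103,107,109,113]
--
-- def convert(arg):
--     output=""
--     for i in arg:
--         i1=ord(i) ;
--         i2=ord(i) ;
--         j=ord(i)
--         if j in primes:
--             output += i
--         else:
--             while i1 not in primes and i1>67:
--                 i1 -= 1
--             while i2 not in primes and i2<113:
--                 i2 += 1
--             if j>113:
--                 output+='q'
--             elif j-i1 > i2-j or j<67:
--                 output += chr(i2)
--             else:
--                 output += chr(i1)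
--     return output
-- ===== SOURCE B (Python) =====
-- primes = [67,71,73,79,83,89,97,101,103,107,109,113]
--
-- def convert(arg):
--     def pick(c):
--         j = ord(c)
--         if j in primes:
--             return c
--         return chr(min(primes, key=lambda p: (abs(j - p), p)))
--     return "".join(map(pick, arg))
-- ===== Notes on version B (the rewrite author's own statement) =====
-- stated objective: simpler
-- what changed: Replaced A's two directional while-loop scans plus distance comparison with a single nearest-prime selection min(primes, key=lambda p: (abs(j-p), p)), which also subsumes the j<67 and j>113 special branches.
import Mathlib
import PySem

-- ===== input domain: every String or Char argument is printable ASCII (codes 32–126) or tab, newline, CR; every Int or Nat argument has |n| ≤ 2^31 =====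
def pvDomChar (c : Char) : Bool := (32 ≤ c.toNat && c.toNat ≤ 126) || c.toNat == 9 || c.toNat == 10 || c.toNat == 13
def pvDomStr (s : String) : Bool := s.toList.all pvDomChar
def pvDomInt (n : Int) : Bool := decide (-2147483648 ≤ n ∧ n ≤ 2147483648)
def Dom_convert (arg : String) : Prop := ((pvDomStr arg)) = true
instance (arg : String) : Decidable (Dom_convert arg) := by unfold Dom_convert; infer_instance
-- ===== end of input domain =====

-- B replaces A's two directional while-scans and special branches with one nearest-element selection over the prime list (objective: simpler).

-- ===== PORT A =====
def pvPrimes : List Int := [67,71,73,79,83,89,97,101,103,107,109,113]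

-- 'while i1 not in primes and i1 > 67: i1 -= 1' (fuel only makes the loop total; on Dom the start is ≤ 126, so 200 steps suffice)
def pvDown (fuel : Nat) (i1 : Int) : Int :=
  match fuel with
  | 0 => i1
  | f + 1 => if i1 ∉ pvPrimes ∧ i1 > 67 then pvDown f (i1 - 1) else i1

-- 'while i2 not in primes and i2 < 113: i2 += 1'
def pvUp (fuel : Nat) (i2 : Int) : Int :=
  match fuel with
  | 0 => i2
  | f + 1 => if i2 ∉ pvPrimes ∧ i2 < 113 then pvUp f (i2 + 1) else i2

-- the loop body of A
def pvStepA (output : String) (i : Char) : String :=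
  let j : Int := i.toNat
  if j ∈ pvPrimes then output.push i
  else
    let i1 := pvDown 200 j
    let i2 := pvUp 200 j
    if j > 113 then output.push 'q'
    else if j - i1 > i2 - j ∨ j < 67 then output.push (Char.ofNat i2.toNat)
    else output.push (Char.ofNat i1.toNat)

def convert (arg : String) : String :=
  arg.toList.foldl pvStepA ""

-- ===== PORT B =====
-- min(primes, key=lambda p: (abs(j-p), p)): first element with lexicographically least key (getD default is never used: the list is nonempty)
def pvNearest (j : Int) : Int :=
  (PySem.List.min2? pvPrimes (fun p => |j - p|) (fun p => p)).getD j

def pvPick (c : Char) : Char :=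
  let j : Int := c.toNat
  if j ∈ pvPrimes then c else Char.ofNat (pvNearest j).toNat

def convert_alt (arg : String) : String :=
  String.ofList (arg.toList.map pvPick)

-- ===== PRECONDITION & SPEC =====
def Spec_convert (arg : String) (out : String) : Prop := out = convert_alt arg
instance (arg : String) (out : String) : Decidable (Spec_convert arg out) := by unfold Spec_convert; infer_instance

-- ===== CLAIM (what is proved, stated in full; the proofs are below) =====
def Claim_equal_convert : Prop := ∀ (arg : String), Dom_convert arg → Spec_convert arg (convert arg)

-- ===== LEMMAS AND PROOFS =====

-- A's per-character result, pulled out of the fold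
def pvPickA (c : Char) : Char :=
  let j : Int := c.toNat
  if j ∈ pvPrimes then c
  else
    let i1 := pvDown 200 j
    let i2 := pvUp 200 j
    if j > 113 then 'q'
    else if j - i1 > i2 - j ∨ j < 67 then Char.ofNat i2.toNat
    else Char.ofNat i1.toNat

lemma pvStepA_push (out : String) (c : Char) : pvStepA out c = out.push (pvPickA c) := by
  simp only [pvStepA, pvPickA]
  split_ifs <;> rfl

set_option maxRecDepth 100000 in
lemma pvPick_eq_of_small (c : Char) (h : c.toNat < 127) : pvPickA c = pvPick c := by
  unfold pvPickA pvPick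
  by_cases hp : ((c.toNat : Int)) ∈ pvPrimes
  · simp only [hp, if_pos]
  · simp only [hp, if_neg, not_false_iff]
    have key : ∀ n : Nat, n < 127 → ((n : Int)) ∉ pvPrimes →
        (if (n : Int) > 113 then 'q'
         else if (n : Int) - pvDown 200 (n : Int) > pvUp 200 (n : Int) - (n : Int) ∨ (n : Int) < 67
           then Char.ofNat (pvUp 200 (n : Int)).toNat
           else Char.ofNat (pvDown 200 (n : Int)).toNat)
        = Char.ofNat (pvNearest (n : Int)).toNat := by decide
    exact key c.toNat h hp

lemma pvFold_eq (l : List Char) (out : String) (h : ∀ c ∈ l, c.toNat < 127) :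
    (l.foldl pvStepA out).toList = out.toList ++ l.map pvPick := by
  induction l generalizing out with
  | nil => simp
  | cons c t ih =>
    simp only [List.foldl_cons, List.map_cons, pvStepA_push]
    rw [ih _ (fun x hx => h x (List.mem_cons_of_mem _ hx)), String.toList_push,
      pvPick_eq_of_small c (h c (List.mem_cons_self ..))]
    simp

-- ===== VERDICT (by name: the statement is the Claim_ definition above) =====
theorem convert_spec : Claim_equal_convert := by
  intro arg hdom
  unfold Spec_convert convert convert_alt
  have h : ∀ c ∈ arg.toList, c.toNat < 127 := by
    intro c hc
    have := List.all_eq_true.mp hdom c hc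
    simp only [pvDomChar, Bool.or_eq_true, Bool.and_eq_true, decide_eq_true_eq, beq_iff_eq] at this
    omega
  apply String.toList_inj.mp
  rw [pvFold_eq _ _ h]
  simp
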